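-- pv_equiv track=rewrite | github.com/thejiraphxn/billberry | backend-py/function/random_id.py | is_pretty
-- ===== SOURCE A (Python) =====
-- def is_pretty(numstr):
--     if numstr.startswith('0'):
--         return False
--     for i in range(len(numstr) - 2):
--         if numstr[i] == numstr[i+1] == numstr[i+2]:
--             return False
--
--     for i in range(len(numstr) - 3):
--         s = numstr[i:i+4]
--         if s in '0123456789' or s in '9876543210':
--             return False
--         try:
--             nums = [int(c) for c in s]
--             if nums == list(range(nums[0], nums[0]+4)):
--                 return False
--             if nums == list(range(nums[0], nums[0]-4, -1)):
--                 return False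
--         except:
--             continue
--     return True
-- ===== SOURCE B (Python) =====
-- def is_pretty(numstr):
--     # one left-to-right pass with three run counters (equal / ascending / descending)
--     if numstr.startswith('0'):
--         return False
--     prev = None
--     eq = asc = desc = 1
--     for c in numstr:
--         if prev is not None:
--             eq = eq + 1 if prev == c else 1
--             if prev.isdigit() and c.isdigit():
--                 d = ord(c) - ord(prev)
--                 asc = asc + 1 if d == 1 else 1
--                 desc = desc + 1 if d == -1 else 1
--             else:
--                 asc = 1
--                 desc = 1
--             if eq >= 3 or asc >= 4 or desc >= 4:
--                 return False
--         prev = c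
--     return True
-- ===== Notes on version B (the rewrite author's own statement) =====
-- stated objective: alternative
-- what changed: A's two index-based window scans (triple-equality windows, then 4-char slices tested by substring membership in the ascending/descending digit strings plus per-character int() parsing and range-list comparison) are replaced by a single left-to-right pass keeping three run counters (equal run, ascending digit run, descending digit run) that fails as soon as a run reaches 3 resp. 4.
import Mathlib
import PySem

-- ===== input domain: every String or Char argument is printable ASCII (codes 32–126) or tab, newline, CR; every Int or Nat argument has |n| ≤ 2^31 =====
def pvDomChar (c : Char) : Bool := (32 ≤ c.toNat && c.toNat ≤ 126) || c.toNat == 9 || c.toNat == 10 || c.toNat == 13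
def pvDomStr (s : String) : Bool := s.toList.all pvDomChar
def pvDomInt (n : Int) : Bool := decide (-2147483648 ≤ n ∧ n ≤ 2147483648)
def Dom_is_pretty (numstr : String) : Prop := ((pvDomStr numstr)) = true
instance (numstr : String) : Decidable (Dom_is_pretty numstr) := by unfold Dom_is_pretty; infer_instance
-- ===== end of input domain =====

-- B replaces A's two index-based window scans (with slicing, substring tests and per-window int()
-- parsing) by one left-to-right pass over the characters keeping three run counters; same value on
-- every input in Dom, proved below.

-- ===== PORT A =====

-- '[int(c) for c in s]': the comprehension raises (caught by the bare 'except') iff any int(c) does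
def pvSeq? : List (Option Int) → Option (List Int)
  | [] => some []
  | none :: _ => none
  | some v :: r => (pvSeq? r).map (v :: ·)

-- the body of A's second loop for the window w = numstr[i:i+4] ('return False' ↦ true = "found")
def pvPredA (w : List Char) : Bool :=
  if PySem.Chars.isIn w ("0123456789".toList) || PySem.Chars.isIn w ("9876543210".toList) then true
  else
    match pvSeq? (w.map (fun ch => PySem.Int.ofChars? [ch])) with
    | none => false                      -- except: continue
    | some nums =>
      match nums with
      | [] => false                      -- nums[0] would raise IndexError, caught: continue (unreachable)
      | n0 :: _ =>
        decide (nums = PySem.List.pyRange n0 (n0 + 4) 1) || decide (nums = PySem.List.pyRange n0 (n0 - 4) (-1))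

def is_pretty (numstr : String) : Bool :=
  let cs := numstr.toList
  if PySem.Str.startswith numstr "0" then false
  -- first loop: 'for i in range(len(numstr) - 2): if numstr[i] == numstr[i+1] == numstr[i+2]: return False'
  -- (indices i, i+1, i+2 are always in range, so pyGetD's default is never used)
  else if (PySem.List.pyRange 0 ((cs.length : Int) - 2) 1).any (fun i =>
      PySem.List.pyGetD cs i ' ' == PySem.List.pyGetD cs (i + 1) ' ' &&
      PySem.List.pyGetD cs (i + 1) ' ' == PySem.List.pyGetD cs (i + 2) ' ') then false
  -- second loop: 'for i in range(len(numstr) - 3): s = numstr[i:i+4]; …'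
  else if (PySem.List.pyRange 0 ((cs.length : Int) - 3) 1).any (fun i =>
      pvPredA (PySem.List.slice cs (some i) (some (i + 4)))) then false
  else true

-- ===== PORT B =====

-- the loop of Source B, from the first character on; prev = p, counters eq/asc/desc
-- (Source B's 'ord(c) - ord(prev)' is 'toNat - toNat' on code points, exact for all chars)
def pvGo (p : Char) (eq asc desc : Int) (l : List Char) : Bool :=
  match l with
  | [] => true
  | c :: r =>
    let eq' := if p == c then eq + 1 else 1
    let ad :=
      if PySem.Chars.isdigit p && PySem.Chars.isdigit c then
        let d : Int := (c.toNat : Int) - (p.toNat : Int)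
        (if d == 1 then asc + 1 else 1, if d == -1 then desc + 1 else 1)
      else ((1 : Int), (1 : Int))
    if eq' ≥ 3 ∨ ad.1 ≥ 4 ∨ ad.2 ≥ 4 then false
    else pvGo c eq' ad.1 ad.2 r

def is_pretty_alt (numstr : String) : Bool :=
  if PySem.Str.startswith numstr "0" then false
  else
    match numstr.toList with
    | [] => true                     -- prev stays None: loop body never fires
    | p :: rest => pvGo p 1 1 1 rest

-- ===== PRECONDITION & SPEC =====
def Spec_is_pretty (numstr : String) (out : Bool) : Prop := out = is_pretty_alt numstr
instance (numstr : String) (out : Bool) : Decidable (Spec_is_pretty numstr out) := by unfold Spec_is_pretty; infer_instance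

-- ===== CLAIM (what is proved, stated in full; the proofs are below) =====
def Claim_equal_is_pretty : Prop := ∀ (numstr : String), Dom_is_pretty numstr → Spec_is_pretty numstr (is_pretty numstr)

-- ===== LEMMAS AND PROOFS =====

-- step predicates: equal step / ascending digit step / descending digit step
def pvSE (x y : Char) : Bool := x == y
def pvSA (x y : Char) : Bool := PySem.Chars.isdigit x && PySem.Chars.isdigit y && ((y.toNat : Int) - (x.toNat : Int) == 1)
def pvSD (x y : Char) : Bool := PySem.Chars.isdigit x && PySem.Chars.isdigit y && ((y.toNat : Int) - (x.toNat : Int) == -1)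

-- window scanners over the whole character list
def pvScan3 (g : Char → Char → Char → Bool) : List Char → Bool
  | a :: b :: c :: r => g a b c || pvScan3 g (b :: c :: r)
  | _ => false

def pvScan4 (g : Char → Char → Char → Char → Bool) : List Char → Bool
  | a :: b :: c :: d :: r => g a b c d || pvScan4 g (b :: c :: d :: r)
  | _ => false

-- run detectors mirroring B's counters (threshold t), and their boolean-carry forms
def pvBad2 (f : Char → Char → Bool) (p : Char) (e : Int) : List Char → Bool
  | [] => false
  | c :: r => let e' := if f p c then e + 1 else 1
              decide (e' ≥ 3) || pvBad2 f c e' r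

def pvBad3 (f : Char → Char → Bool) (p : Char) (a : Int) : List Char → Bool
  | [] => false
  | c :: r => let a' := if f p c then a + 1 else 1
              decide (a' ≥ 4) || pvBad3 f c a' r

def pvCar2 (f : Char → Char → Bool) (s : Bool) (p : Char) : List Char → Bool
  | [] => false
  | c :: r => (s && f p c) || pvCar2 f (f p c) c r

def pvCar3 (f : Char → Char → Bool) (s1 s2 : Bool) (p : Char) : List Char → Bool
  | [] => false
  | c :: r => (s1 && s2 && f p c) || pvCar3 f s2 (f p c) c r

theorem charEq_of_toNat {a b : Char} (h : a.toNat = b.toNat) : a = b :=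
  Char.ext (UInt32.toNat_inj.mp h)

theorem eq_ofNat_of_toNat {y : Char} {k : Nat} (h : y.toNat = k) (hk : k < 55296) : y = Char.ofNat k := by
  apply charEq_of_toNat
  rw [Char.toNat_ofNat]
  have hv : k.isValidChar := Or.inl hk
  simp [hv, h]

theorem pv_digit_some (c : Char) (h : PySem.Chars.isdigit c = true) :
    PySem.Int.ofChars? [c] = some ((c.toNat : Int) - 48) := by
  simp [PySem.Chars.isdigit, Char.le_def] at h
  have h1 : 48 ≤ c.toNat := h.1
  have h2 : c.toNat ≤ 57 := h.2
  rw [eq_ofNat_of_toNat (rfl : c.toNat = c.toNat) (by omega)]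
  generalize c.toNat = n at h1 h2 ⊢
  interval_cases n <;> decide

theorem pv_nondigit_none (c : Char) (hd : pvDomChar c = true) (h : PySem.Chars.isdigit c = false) :
    PySem.Int.ofChars? [c] = none := by
  simp [pvDomChar] at hd
  have hle : c.toNat ≤ 126 := by omega
  have hge : 9 ≤ c.toNat := by omega
  rw [eq_ofNat_of_toNat (rfl : c.toNat = c.toNat) (by omega)] at h ⊢
  generalize c.toNat = n at hge hle h
  interval_cases n <;> revert h <;> decide

theorem pv_digit_bounds {c : Char} (h : PySem.Chars.isdigit c = true) : 48 ≤ c.toNat ∧ c.toNat ≤ 57 := by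
  simpa [PySem.Chars.isdigit, Char.le_def] using h

theorem pv_asc_window (a b c d : Char) :
    PySem.Chars.isIn [a, b, c, d] ("0123456789".toList) = (pvSA a b && pvSA b c && pvSA c d) := by
  rw [Bool.eq_iff_iff, PySem.Chars.isIn_iff_infix]
  show [a, b, c, d] <:+: ['0','1','2','3','4','5','6','7','8','9'] ↔ _
  constructor
  · intro h
    simp only [List.infix_cons_iff, List.cons_prefix_cons, List.prefix_nil, List.infix_nil] at h
    rcases h with h|h|h|h|h|h|h|h|h|h|h <;>
      first
        | (obtain ⟨rfl, rfl, rfl, rfl, -⟩ := h; decide)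
        | simp at h
  · intro h
    simp only [pvSA, Bool.and_eq_true, beq_iff_eq] at h
    obtain ⟨⟨⟨⟨hda, hdb⟩, e1⟩, ⟨-, hdc⟩, e2⟩, ⟨-, hdd⟩, e3⟩ := h
    obtain ⟨ha1, ha2⟩ := pv_digit_bounds hda
    obtain ⟨hb1, hb2⟩ := pv_digit_bounds hdb
    obtain ⟨hc1, hc2⟩ := pv_digit_bounds hdc
    obtain ⟨hd1, hd2⟩ := pv_digit_bounds hdd
    rw [eq_ofNat_of_toNat (rfl : a.toNat = a.toNat) (by omega),
        eq_ofNat_of_toNat (show b.toNat = a.toNat + 1 by omega) (by omega),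
        eq_ofNat_of_toNat (show c.toNat = a.toNat + 2 by omega) (by omega),
        eq_ofNat_of_toNat (show d.toNat = a.toNat + 3 by omega) (by omega)]
    have hr : a.toNat ≤ 54 := by omega
    generalize a.toNat = n at ha1 hr ⊢
    interval_cases n <;> decide

theorem pv_desc_window (a b c d : Char) :
    PySem.Chars.isIn [a, b, c, d] ("9876543210".toList) = (pvSD a b && pvSD b c && pvSD c d) := by
  rw [Bool.eq_iff_iff, PySem.Chars.isIn_iff_infix]
  show [a, b, c, d] <:+: ['9','8','7','6','5','4','3','2','1','0'] ↔ _
  constructor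
  · intro h
    simp only [List.infix_cons_iff, List.cons_prefix_cons, List.prefix_nil, List.infix_nil] at h
    rcases h with h|h|h|h|h|h|h|h|h|h|h <;>
      first
        | (obtain ⟨rfl, rfl, rfl, rfl, -⟩ := h; decide)
        | simp at h
  · intro h
    simp only [pvSD, Bool.and_eq_true, beq_iff_eq] at h
    obtain ⟨⟨⟨⟨hda, hdb⟩, e1⟩, ⟨-, hdc⟩, e2⟩, ⟨-, hdd⟩, e3⟩ := h
    obtain ⟨ha1, ha2⟩ := pv_digit_bounds hda
    obtain ⟨hb1, hb2⟩ := pv_digit_bounds hdb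
    obtain ⟨hc1, hc2⟩ := pv_digit_bounds hdc
    obtain ⟨hd1, hd2⟩ := pv_digit_bounds hdd
    rw [eq_ofNat_of_toNat (rfl : a.toNat = a.toNat) (by omega),
        eq_ofNat_of_toNat (show b.toNat = a.toNat - 1 by omega) (by omega),
        eq_ofNat_of_toNat (show c.toNat = a.toNat - 2 by omega) (by omega),
        eq_ofNat_of_toNat (show d.toNat = a.toNat - 3 by omega) (by omega)]
    have hr : 51 ≤ a.toNat := by omega
    generalize a.toNat = n at ha2 hr ⊢
    interval_cases n <;> decide

theorem pv_pyRange4_asc (n : Int) : PySem.List.pyRange n (n + 4) 1 = [n, n + 1, n + 2, n + 3] := by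
  rw [PySem.List.pyRange_one_cons (by omega), PySem.List.pyRange_one_cons (by omega),
      PySem.List.pyRange_one_cons (by omega), PySem.List.pyRange_one_cons (by omega),
      PySem.List.pyRange_one_eq_nil (by omega)]

  norm_num
  constructor <;> omega

theorem pv_pyRange4_desc (n : Int) : PySem.List.pyRange n (n - 4) (-1) = [n, n - 1, n - 2, n - 3] := by
  rw [PySem.List.pyRange_neg_one_cons (by omega), PySem.List.pyRange_neg_one_cons (by omega),
      PySem.List.pyRange_neg_one_cons (by omega), PySem.List.pyRange_neg_one_cons (by omega),
      PySem.List.pyRange_neg_one_eq_nil (by omega)]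

  norm_num
  constructor <;> omega

theorem pv_predA_eq (a b c d : Char) (ha : pvDomChar a = true) (hb : pvDomChar b = true)
    (hc : pvDomChar c = true) (hd : pvDomChar d = true) :
    pvPredA [a, b, c, d] = ((pvSA a b && pvSA b c && pvSA c d) || (pvSD a b && pvSD b c && pvSD c d)) := by
  unfold pvPredA
  rw [pv_asc_window, pv_desc_window]
  cases hda : PySem.Chars.isdigit a <;> cases hdb : PySem.Chars.isdigit b <;>
    cases hdc : PySem.Chars.isdigit c <;> cases hdd : PySem.Chars.isdigit d
  case true.true.true.true =>
    simp only [List.map, pvSeq?, pv_digit_some a hda, pv_digit_some b hdb,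
      pv_digit_some c hdc, pv_digit_some d hdd, Option.map_some]
    rw [pv_pyRange4_asc, pv_pyRange4_desc]
    simp only [pvSA, pvSD, hda, hdb, hdc, hdd, Bool.true_and]
    split_ifs with h
    · exact h.symm
    · have h' := h
      simp only [Bool.or_eq_true, Bool.and_eq_true, beq_iff_eq] at h'
      simp only [Bool.not_eq_true] at h
      rw [h]
      simp only [Bool.or_eq_false_iff, decide_eq_false_iff_not, List.cons.injEq]
      constructor <;> intro hq <;> exact h' (by omega)
  all_goals
    simp [List.map, pvSeq?, pvSA, pvSD, hda, hdb, hdc, hdd,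
      pv_digit_some, pv_nondigit_none, ha, hb, hc, hd]

theorem pv_go_eq_bad (l : List Char) : ∀ (p : Char) (e a d : Int),
    pvGo p e a d l = !(pvBad2 pvSE p e l || pvBad3 pvSA p a l || pvBad3 pvSD p d l) := by
  induction l with
  | nil => intro p e a d; simp [pvGo, pvBad2, pvBad3]
  | cons c r ih =>
    intro p e a d
    simp only [pvGo, pvBad2, pvBad3]
    have hsa : (if PySem.Chars.isdigit p && PySem.Chars.isdigit c then
        ((if ((c.toNat : Int) - (p.toNat : Int)) == 1 then a + 1 else 1),
         (if ((c.toNat : Int) - (p.toNat : Int)) == -1 then d + 1 else 1))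
      else ((1 : Int), (1 : Int))) = ((if pvSA p c then a + 1 else 1), (if pvSD p c then d + 1 else 1)) := by
      unfold pvSA pvSD
      cases PySem.Chars.isdigit p <;> cases PySem.Chars.isdigit c <;> simp
    rw [hsa]
    by_cases h3 : (if pvSE p c then e + 1 else 1) ≥ 3 <;>
      by_cases h4 : (if pvSA p c then a + 1 else 1) ≥ 4 <;>
      by_cases h5 : (if pvSD p c then d + 1 else 1) ≥ 4 <;>
      simp [pvSE, h4, h5, ih, Bool.and_assoc]

theorem pv_bad2_eq_car (f : Char → Char → Bool) (l : List Char) : ∀ (p : Char) (e : Int), 1 ≤ e →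
    pvBad2 f p e l = pvCar2 f (decide (2 ≤ e)) p l := by
  induction l with
  | nil => intro p e he; simp [pvBad2, pvCar2]
  | cons c r ih =>
    intro p e he
    simp only [pvBad2, pvCar2]
    by_cases hf : f p c = true
    · have hf' := hf
      rw [if_pos hf, ih c (e + 1) (by omega), hf']
      have h1 : decide (e + 1 ≥ 3) = decide (2 ≤ e) := decide_eq_decide.mpr (by omega)
      have h2 : decide (2 ≤ e + 1) = true := decide_eq_true (by omega)
      rw [h1, h2]
      simp
    · have hf' : f p c = false := by simpa using hf
      rw [if_neg hf, ih c 1 (by omega), hf']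
      simp

theorem pv_car3_s1_irrel (f : Char → Char → Bool) (r : List Char) (x y : Bool) (c : Char) :
    pvCar3 f x false c r = pvCar3 f y false c r := by
  cases r with
  | nil => rfl
  | cons d r' => simp [pvCar3]

theorem pv_bad3_eq_car (f : Char → Char → Bool) (l : List Char) : ∀ (p : Char) (a : Int), 1 ≤ a →
    pvBad3 f p a l = pvCar3 f (decide (3 ≤ a)) (decide (2 ≤ a)) p l := by
  induction l with
  | nil => intro p a ha; simp [pvBad3, pvCar3]
  | cons c r ih =>
    intro p a ha
    simp only [pvBad3, pvCar3]
    by_cases hf : f p c = true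
    · have hf' := hf
      rw [if_pos hf, ih c (a + 1) (by omega), hf']
      have h1 : decide (a + 1 ≥ 4) = (decide (3 ≤ a) && decide (2 ≤ a)) := by
        by_cases h : 3 ≤ a
        · have : 2 ≤ a := by omega
          simp [h, this]; omega
        · by_cases h' : 2 ≤ a <;> simp [h, h'] <;> omega
      have h2 : decide (3 ≤ a + 1) = decide (2 ≤ a) := decide_eq_decide.mpr (by omega)
      have h3 : decide (2 ≤ a + 1) = true := decide_eq_true (by omega)
      rw [h1, h2, h3]
      simp
    · have hf' : f p c = false := by simpa using hf
      rw [if_neg hf, ih c 1 (by omega), hf']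
      simp [pv_car3_s1_irrel f r false (decide (2 ≤ a)) c]

theorem pv_car2_scan3 (f : Char → Char → Bool) (l : List Char) : ∀ (a b : Char),
    pvScan3 (fun x y z => f x y && f y z) (a :: b :: l) = pvCar2 f (f a b) b l := by
  induction l with
  | nil => intro a b; rfl
  | cons c r ih =>
    intro a b
    show (f a b && f b c || pvScan3 _ (b :: c :: r)) = _
    rw [ih b c]
    rfl

theorem pv_car2_scan3' (f : Char → Char → Bool) (p : Char) (l : List Char) :
    pvCar2 f false p l = pvScan3 (fun x y z => f x y && f y z) (p :: l) := by
  cases l with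
  | nil => rfl
  | cons c r =>
    show (false && f p c || pvCar2 f (f p c) c r) = _
    rw [pv_car2_scan3 f r p c]
    simp

theorem pv_car3_scan4 (f : Char → Char → Bool) (l : List Char) : ∀ (a b c : Char),
    pvScan4 (fun x y z w => f x y && f y z && f z w) (a :: b :: c :: l) = pvCar3 f (f a b) (f b c) c l := by
  induction l with
  | nil => intro a b c; rfl
  | cons d r ih =>
    intro a b c
    show (f a b && f b c && f c d || pvScan4 _ (b :: c :: d :: r)) = _
    rw [ih b c d]
    rfl

theorem pv_car3_scan4' (f : Char → Char → Bool) (p : Char) (l : List Char) :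
    pvCar3 f false false p l = pvScan4 (fun x y z w => f x y && f y z && f z w) (p :: l) := by
  cases l with
  | nil => rfl
  | cons c r =>
    show (false && false && f p c || pvCar3 f false (f p c) c r) = _
    cases r with
    | nil => rfl
    | cons d r' =>
      show _ = pvScan4 _ (p :: c :: d :: r')
      rw [show (pvCar3 f false (f p c) c (d :: r')) = (false && f p c && f c d || pvCar3 f (f p c) (f c d) d r') from rfl]
      rw [pv_car3_scan4 f r' p c d]
      simp

theorem pv_anyRange3 (g : Char → Char → Char → Bool) : ∀ (cs : List Char),
    (List.range (cs.length - 2)).any (fun k => g (cs.getD k ' ') (cs.getD (k + 1) ' ') (cs.getD (k + 2) ' ')) =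
      pvScan3 g cs := by
  intro cs
  induction cs with
  | nil => rfl
  | cons x t ih =>
    rcases t with _ | ⟨y, _ | ⟨z, r⟩⟩
    · rfl
    · rfl
    · have hlen : (x :: y :: z :: r).length - 2 = r.length + 1 := by simp
      rw [hlen, List.range_succ_eq_map, List.any_cons, List.any_map]
      have hbody : ((List.range r.length).any fun k =>
            g ((x :: y :: z :: r).getD (Nat.succ k) ' ') ((x :: y :: z :: r).getD (Nat.succ k + 1) ' ')
              ((x :: y :: z :: r).getD (Nat.succ k + 2) ' ')) =
          ((List.range ((y :: z :: r).length - 2)).any fun k =>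
            g ((y :: z :: r).getD k ' ') ((y :: z :: r).getD (k + 1) ' ') ((y :: z :: r).getD (k + 2) ' ')) := by
        have : (y :: z :: r).length - 2 = r.length := by simp
        rw [this]
        refine congrArg _ (funext fun k => ?_)
        simp [Nat.succ_eq_add_one]
      rw [show (Function.comp (fun k => g ((x :: y :: z :: r).getD k ' ') ((x :: y :: z :: r).getD (k + 1) ' ')
            ((x :: y :: z :: r).getD (k + 2) ' ')) Nat.succ) = (fun k =>
            g ((x :: y :: z :: r).getD (Nat.succ k) ' ') ((x :: y :: z :: r).getD (Nat.succ k + 1) ' ')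
              ((x :: y :: z :: r).getD (Nat.succ k + 2) ' ')) from rfl]
      rw [hbody, ih]
      rfl

theorem pv_anyRange4 (F : List Char → Bool) : ∀ (cs : List Char),
    (List.range (cs.length - 3)).any (fun k => F ((cs.drop k).take 4)) =
      pvScan4 (fun a b c d => F [a, b, c, d]) cs := by
  intro cs
  induction cs with
  | nil => rfl
  | cons x t ih =>
    rcases t with _ | ⟨y, _ | ⟨z, _ | ⟨w, r⟩⟩⟩
    · rfl
    · rfl
    · rfl
    · have hlen : (x :: y :: z :: w :: r).length - 3 = r.length + 1 := by simp
      rw [hlen, List.range_succ_eq_map, List.any_cons, List.any_map]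
      have hbody : ((List.range r.length).any fun k =>
            F (((x :: y :: z :: w :: r).drop (Nat.succ k)).take 4)) =
          ((List.range ((y :: z :: w :: r).length - 3)).any fun k =>
            F (((y :: z :: w :: r).drop k).take 4)) := by
        have : (y :: z :: w :: r).length - 3 = r.length := by simp
        rw [this]
        refine congrArg _ (funext fun k => ?_)
        simp [Nat.succ_eq_add_one, List.drop_succ_cons]
      rw [show (Function.comp (fun k => F (((x :: y :: z :: w :: r).drop k).take 4)) Nat.succ) =
          (fun k => F (((x :: y :: z :: w :: r).drop (Nat.succ k)).take 4)) from rfl]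
      rw [hbody, ih]
      rfl

theorem pv_scan4_congr (g g' : Char → Char → Char → Char → Bool) : ∀ (cs : List Char),
    (∀ x ∈ cs, pvDomChar x = true) →
    (∀ a b c d, pvDomChar a = true → pvDomChar b = true → pvDomChar c = true → pvDomChar d = true →
      g a b c d = g' a b c d) →
    pvScan4 g cs = pvScan4 g' cs := by
  intro cs
  induction cs with
  | nil => intro _ _; rfl
  | cons a t ih =>
    intro hall hpt
    rcases t with _ | ⟨b, _ | ⟨c, _ | ⟨d, r⟩⟩⟩
    · rfl
    · rfl
    · rfl
    · show (g a b c d || pvScan4 g (b :: c :: d :: r)) = (g' a b c d || pvScan4 g' (b :: c :: d :: r))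
      rw [hpt a b c d (hall a (by simp)) (hall b (by simp)) (hall c (by simp)) (hall d (by simp)),
        ih (fun x hx => hall x (by simp [List.mem_cons] at hx ⊢; tauto)) hpt]

theorem pv_scan4_or (g1 g2 : Char → Char → Char → Char → Bool) : ∀ (cs : List Char),
    pvScan4 (fun a b c d => g1 a b c d || g2 a b c d) cs = (pvScan4 g1 cs || pvScan4 g2 cs) := by
  intro cs
  induction cs with
  | nil => rfl
  | cons a t ih =>
    rcases t with _ | ⟨b, _ | ⟨c, _ | ⟨d, r⟩⟩⟩
    · rfl
    · rfl
    · rfl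
    · show ((g1 a b c d || g2 a b c d) || pvScan4 _ (b :: c :: d :: r)) = _
      rw [ih]
      show _ = ((g1 a b c d || pvScan4 g1 (b :: c :: d :: r)) || (g2 a b c d || pvScan4 g2 (b :: c :: d :: r)))
      cases g1 a b c d <;> cases g2 a b c d <;> simp [Bool.or_comm]

-- ===== VERDICT (by name: the statement is the Claim_ definition above) =====
theorem pv_any1_scan (cs : List Char) :
    ((PySem.List.pyRange 0 ((cs.length : Int) - 2) 1).any fun i =>
        PySem.List.pyGetD cs i ' ' == PySem.List.pyGetD cs (i + 1) ' ' &&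
          PySem.List.pyGetD cs (i + 1) ' ' == PySem.List.pyGetD cs (i + 2) ' ') =
      pvScan3 (fun a b c => a == b && b == c) cs := by
  rw [PySem.List.pyRange_one, List.any_map]
  have h1 : ((cs.length : Int) - 2 - 0).toNat = cs.length - 2 := by omega
  rw [h1]
  rw [← pv_anyRange3 (fun a b c => a == b && b == c) cs]
  refine congrArg _ (funext fun k => ?_)
  show (PySem.List.pyGetD cs ((0 : Int) + (k : Nat)) ' ' == PySem.List.pyGetD cs ((0 : Int) + (k : Nat) + 1) ' ' &&
      (PySem.List.pyGetD cs ((0 : Int) + (k : Nat) + 1) ' ' == PySem.List.pyGetD cs ((0 : Int) + (k : Nat) + 2) ' ')) = _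
  have e0 : (0 : Int) + (k : Nat) = ((k : Nat) : Int) := by omega
  have e1 : ((k : Nat) : Int) + 1 = (((k + 1 : Nat)) : Int) := by omega
  have e2 : ((k : Nat) : Int) + 2 = (((k + 2 : Nat)) : Int) := by omega
  rw [e0, e1, e2, PySem.List.pyGetD_natCast, PySem.List.pyGetD_natCast, PySem.List.pyGetD_natCast]

theorem pv_any2_scan (cs : List Char) :
    ((PySem.List.pyRange 0 ((cs.length : Int) - 3) 1).any fun i =>
        pvPredA (PySem.List.slice cs (some i) (some (i + 4)))) =
      pvScan4 (fun a b c d => pvPredA [a, b, c, d]) cs := by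
  rw [PySem.List.pyRange_one, List.any_map]
  have h1 : ((cs.length : Int) - 3 - 0).toNat = cs.length - 3 := by omega
  rw [h1]
  rw [← pv_anyRange4 pvPredA cs]
  refine congrArg _ (funext fun k => ?_)
  show pvPredA (PySem.List.slice cs (some ((0 : Int) + (k : Nat))) (some ((0 : Int) + (k : Nat) + 4))) = _
  have e0 : (0 : Int) + (k : Nat) = ((k : Nat) : Int) := by omega
  have e4 : ((k : Nat) : Int) + 4 = (((k : Nat) : Int) + ((4 : Nat) : Int)) := by omega
  rw [e0, e4, PySem.List.slice_natCast_add]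

theorem pv_main (numstr : String) (hdom : Dom_is_pretty numstr) :
    is_pretty numstr = is_pretty_alt numstr := by
  unfold is_pretty is_pretty_alt
  by_cases hs : PySem.Str.startswith numstr "0" = true
  · rw [if_pos hs, if_pos hs]
  · rw [if_neg hs, if_neg hs]
    have hall : ∀ x ∈ numstr.toList, pvDomChar x = true := by
      have h := hdom
      unfold Dom_is_pretty pvDomStr at h
      exact List.all_eq_true.mp h
    generalize numstr.toList = cs at hall ⊢
    rw [pv_any1_scan cs, pv_any2_scan cs]
    rw [pv_scan4_congr (fun a b c d => pvPredA [a, b, c, d])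
      (fun a b c d => (pvSA a b && pvSA b c && pvSA c d) || (pvSD a b && pvSD b c && pvSD c d)) cs hall
      (fun a b c d ha hb hc hd => pv_predA_eq a b c d ha hb hc hd)]
    rw [pv_scan4_or]
    cases cs with
    | nil => rfl
    | cons p rest =>
      show _ = pvGo p 1 1 1 rest
      rw [pv_go_eq_bad rest p 1 1 1]
      rw [pv_bad2_eq_car pvSE rest p 1 (by omega), pv_bad3_eq_car pvSA rest p 1 (by omega),
        pv_bad3_eq_car pvSD rest p 1 (by omega)]
      rw [show (decide ((2:Int) ≤ 1)) = false from rfl, show (decide ((3:Int) ≤ 1)) = false from rfl]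
      rw [pv_car2_scan3' pvSE p rest, pv_car3_scan4' pvSA p rest, pv_car3_scan4' pvSD p rest]
      rw [show (fun x y z => pvSE x y && pvSE y z) = (fun a b c => a == b && b == c) from rfl]
      rw [show (fun x y z w => pvSA x y && pvSA y z && pvSA z w) = (fun a b c d => pvSA a b && pvSA b c && pvSA c d) from rfl]
      rw [show (fun x y z w => pvSD x y && pvSD y z && pvSD z w) = (fun a b c d => pvSD a b && pvSD b c && pvSD c d) from rfl]
      cases pvScan3 (fun a b c => a == b && b == c) (p :: rest) <;>
        cases pvScan4 (fun a b c d => pvSA a b && pvSA b c && pvSA c d) (p :: rest) <;>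
        cases pvScan4 (fun a b c d => pvSD a b && pvSD b c && pvSD c d) (p :: rest) <;>
        simp

-- ===== VERDICT (by name: the statement is the Claim_ definition above) =====
theorem is_pretty_spec : Claim_equal_is_pretty := by
  intro numstr hdom
  exact pv_main numstr hdom
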